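-- pv_equiv track=rewrite | github.com/linda603/leetcode | 2268 Minimum Number of Keypresses/2268minimum-number-of-keypresses.py | minimumKeypresses
-- ===== SOURCE A (Python) =====
-- def minimumKeypresses(s: str) -> int:
--     count = [0] * 26
--
--     for char in s:
--         count[ord(char) - ord('a')] += 1
--
--     count = sorted(count, reverse = True)
--
--     #return sum(count[:9]) + 2 * sum(count[9: 18]) + 3 * sum(count[18:])
--
--     res = 0
--     keyPresses = 0
--
--     for i in range(len(count)):
--         if i % 9 == 0:
--             keyPresses += 1
--         res += keyPresses * count[i]
--
--     return res
-- ===== SOURCE B (Python) =====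
-- def minimumKeypresses(s: str) -> int:
--     freq = [0] * 26
--     for c in s:
--         freq[ord(c) - ord('a')] += 1
--     # Level-set sweep: no sorting. For threshold t, g = #letters with freq >= t.
--     # Each threshold level contributes g presses for the first key slot tier,
--     # plus max(g-9,0) and max(g-18,0) for letters pushed into tiers 2 and 3.
--     total = 0
--     t = 1
--     while True:
--         g = sum(1 for f in freq if f >= t)
--         if g == 0:
--             break
--         m = min(f for f in freq if f >= t)
--         total += (m - t + 1) * (g + max(g - 9, 0) + max(g - 18, 0))
--         t = m + 1
--     return total
-- ===== Notes on version B (the rewrite author's own statement) =====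
-- stated objective: alternative
-- what changed: B replaces A's sort-then-rank-weight computation by a level-set sweep that never sorts: it iterates over frequency thresholds t, counts g = #letters with freq >= t, and adds (segment length) * (g + max(g-9,0) + max(g-18,0)) per constant-g segment.
import Mathlib
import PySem

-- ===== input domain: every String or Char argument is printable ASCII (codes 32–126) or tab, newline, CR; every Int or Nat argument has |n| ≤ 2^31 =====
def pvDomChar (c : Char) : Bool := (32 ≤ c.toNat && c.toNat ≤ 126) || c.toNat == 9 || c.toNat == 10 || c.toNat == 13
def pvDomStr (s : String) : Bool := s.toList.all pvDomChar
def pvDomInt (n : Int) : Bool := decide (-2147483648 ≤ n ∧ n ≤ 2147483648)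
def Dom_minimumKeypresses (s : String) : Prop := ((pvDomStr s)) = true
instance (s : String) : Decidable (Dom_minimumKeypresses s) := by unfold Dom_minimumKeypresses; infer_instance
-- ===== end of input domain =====

-- B replaces A's sort-then-rank-weight loop by a level-set sweep that never sorts:
-- it walks frequency thresholds t, counts g = #letters with freq >= t, and adds
-- (segment length) * (g + max(g-9,0) + max(g-18,0)) per constant-g segment (objective: alternative).

-- ===== PORT A =====
def minimumKeypresses (s : String) : Int :=
  let count := s.toList.foldl (fun cnt ch =>
      PySem.List.pySetD cnt ((ch.toNat : Int) - 97)
        (PySem.List.pyGetD cnt ((ch.toNat : Int) - 97) 0 + 1))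
    (List.replicate 26 (0 : Int))
  let count := PySem.List.sorted count (fun x => x) true
  let r := (PySem.List.pyRange 0 (count.length : Int) 1).foldl
      (fun (st : Int × Int) i =>
        let keyPresses := if PySem.Int.mod i 9 == 0 then st.2 + 1 else st.2
        (st.1 + keyPresses * PySem.List.pyGetD count i 0, keyPresses))
      (0, 0)
  r.1

-- ===== PORT B =====
-- B's while loop, with a fuel bound (27 > the 26-entry list's filter length, so it is
-- never exhausted; the loop's survivor count strictly decreases each iteration).
-- At threshold t: g = sum(1 for f in freq if f >= t); stop when g == 0; otherwise
-- m = min(f for f in freq if f >= t) (the `.getD 0` default is unreachable since g ≠ 0),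
-- add the block for levels t..m, continue at m+1.
def pvLoopB (freq : List Int) : Int → Int → Nat → Int
  | total, _, 0 => total
  | total, t, fuel + 1 =>
    let g : Int := ((freq.filter (fun f => decide (t ≤ f))).length : Int)
    if g = 0 then total
    else
      let m := (PySem.List.min? (freq.filter (fun f => decide (t ≤ f))) (fun x => x)).getD 0
      pvLoopB freq (total + (m - t + 1) * (g + max (g - 9) 0 + max (g - 18) 0)) (m + 1) fuel

def minimumKeypresses_alt (s : String) : Int :=
  let freq := s.toList.foldl (fun cnt ch =>
      PySem.List.pySetD cnt ((ch.toNat : Int) - 97)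
        (PySem.List.pyGetD cnt ((ch.toNat : Int) - 97) 0 + 1))
    (List.replicate 26 (0 : Int))
  pvLoopB freq 0 1 27

-- ===== PRECONDITION & SPEC =====
-- Pre_ excludes exactly the characters with codes outside 71..122 ('G'..'z'), on which
-- A's count[ord(char) - ord('a')] raises IndexError (index below -26 or above 25).
def Pre_minimumKeypresses (s : String) : Prop :=
  s.toList.all (fun c => 71 ≤ c.toNat && c.toNat ≤ 122) = true
instance (s : String) : Decidable (Pre_minimumKeypresses s) := by
  unfold Pre_minimumKeypresses; infer_instance
def pvWitness_minimumKeypresses : String := "hello"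

def Spec_minimumKeypresses (s : String) (out : Int) : Prop := out = minimumKeypresses_alt s
instance (s : String) (out : Int) : Decidable (Spec_minimumKeypresses s out) := by unfold Spec_minimumKeypresses; infer_instance

-- ===== CLAIM (what is proved, stated in full; the proofs are below) =====
def Claim_equal_minimumKeypresses : Prop := ∀ (s : String), Dom_minimumKeypresses s → Pre_minimumKeypresses s → Spec_minimumKeypresses s (minimumKeypresses s)

-- ===== LEMMAS AND PROOFS =====

-- A's loop body, named for the proofs
def pvF (L : List Int) (st : Int × Int) (i : Int) : Int × Int :=
  let keyPresses := if PySem.Int.mod i 9 == 0 then st.2 + 1 else st.2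
  (st.1 + keyPresses * PySem.List.pyGetD L i 0, keyPresses)

-- over a run of indices containing no multiple of 9 the weight stays kp
lemma pvSeg (L : List Int) (n : Nat) : ∀ (a res kp : Int),
    (∀ i : Int, a ≤ i → i < a + (n : Int) → PySem.Int.mod i 9 ≠ 0) →
    (PySem.List.pyRange a (a + (n : Int)) 1).foldl (pvF L) (res, kp)
      = (res + kp * ((PySem.List.pyRange a (a + (n : Int)) 1).map
          (fun i => PySem.List.pyGetD L i 0)).sum, kp) := by
  induction n with
  | zero =>
      intro a res kp _
      simp
  | succ m ih =>
      intro a res kp h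
      have hab : a < a + ((m + 1 : Nat) : Int) := by push_cast; omega
      have hcast : a + ((m + 1 : Nat) : Int) = (a + 1) + (m : Int) := by push_cast; ring
      rw [PySem.List.pyRange_one_cons hab]
      have hhead : pvF L (res, kp) a = (res + kp * PySem.List.pyGetD L a 0, kp) := by
        have hm0 : PySem.Int.mod a 9 ≠ 0 := h a le_rfl hab
        have hdvd : ¬ (9 : Int) ∣ a := by simpa using hm0
        simp [pvF, hdvd]
      rw [List.foldl_cons, hhead, hcast,
          ih (a + 1) _ kp (fun i h1 h2 => h i (by omega) (by push_cast at h2 ⊢; omega))]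
      rw [List.map_cons, List.sum_cons]
      simp only [Prod.mk.injEq]
      exact ⟨by ring, trivial⟩

lemma pvSeg' (L : List Int) (a b res kp : Int) (hab : a ≤ b)
    (h : ∀ i : Int, a ≤ i → i < b → PySem.Int.mod i 9 ≠ 0) :
    (PySem.List.pyRange a b 1).foldl (pvF L) (res, kp)
      = (res + kp * ((PySem.List.pyRange a b 1).map
          (fun i => PySem.List.pyGetD L i 0)).sum, kp) := by
  obtain ⟨n, rfl⟩ : ∃ n : Nat, b = a + (n : Int) := ⟨(b - a).toNat, by omega⟩
  exact pvSeg L n a res kp h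

-- a chunk starting at a multiple of 9 bumps the weight once, to kp+1
lemma pvChunk (L : List Int) (a b res kp : Int) (hab : a < b)
    (ha : PySem.Int.mod a 9 = 0)
    (h : ∀ i : Int, a < i → i < b → PySem.Int.mod i 9 ≠ 0) :
    (PySem.List.pyRange a b 1).foldl (pvF L) (res, kp)
      = (res + (kp + 1) * ((PySem.List.pyRange a b 1).map
          (fun i => PySem.List.pyGetD L i 0)).sum, kp + 1) := by
  rw [PySem.List.pyRange_one_cons hab]
  have hhead : pvF L (res, kp) a = (res + (kp + 1) * PySem.List.pyGetD L a 0, kp + 1) := by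
    have hdvd : (9 : Int) ∣ a := by simpa using ha
    simp [pvF, hdvd]
  rw [List.foldl_cons, hhead,
      pvSeg' L (a + 1) b _ _ (by omega) (fun i h1 h2 => h i (by omega) h2),
      List.map_cons, List.sum_cons]
  simp only [Prod.mk.injEq]
  exact ⟨by ring, trivial⟩

-- on a 26-slot list, A's running-weight loop is the three slice sums
lemma pvLoop26 (L : List Int) (h : L.length = 26) :
    ((PySem.List.pyRange 0 (L.length : Int) 1).foldl
      (fun (st : Int × Int) i =>
        let keyPresses := if PySem.Int.mod i 9 == 0 then st.2 + 1 else st.2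
        (st.1 + keyPresses * PySem.List.pyGetD L i 0, keyPresses)) (0, 0)).1
    = L.sum + (L.drop 9).sum + (L.drop 18).sum := by
  have hb : (L.length : Int) = 26 := by rw [h]; norm_num
  show ((PySem.List.pyRange 0 (L.length : Int) 1).foldl (pvF L) (0, 0)).1 = _
  have hsplit1 : PySem.List.pyRange 0 (L.length : Int) 1
      = PySem.List.pyRange 0 9 1 ++ PySem.List.pyRange 9 (L.length : Int) 1 :=
    PySem.List.pyRange_one_append 0 9 _ (by norm_num) (by omega)
  have hsplit2 : PySem.List.pyRange 9 (L.length : Int) 1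
      = PySem.List.pyRange 9 18 1 ++ PySem.List.pyRange 18 (L.length : Int) 1 :=
    PySem.List.pyRange_one_append 9 18 _ (by norm_num) (by omega)
  have hS0 : ((PySem.List.pyRange 0 (L.length : Int) 1).map
      (fun i => PySem.List.pyGetD L i 0)).sum = L.sum := by
    have h0 := PySem.List.map_pyGetD_pyRange_zero L (0 : Int)
    simp only [PySem.List.len_eq] at h0
    rw [h0]
  have hS9 : ((PySem.List.pyRange 9 (L.length : Int) 1).map
      (fun i => PySem.List.pyGetD L i 0)).sum = (L.drop 9).sum := by
    have h9 := PySem.List.map_pyGetD_pyRange L (0 : Int) (a := 9) (by norm_num)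
    simp only [PySem.List.len_eq] at h9
    rw [show Int.toNat 9 = 9 from rfl] at h9
    rw [h9]
  have hS18 : ((PySem.List.pyRange 18 (L.length : Int) 1).map
      (fun i => PySem.List.pyGetD L i 0)).sum = (L.drop 18).sum := by
    have h18 := PySem.List.map_pyGetD_pyRange L (0 : Int) (a := 18) (by norm_num)
    simp only [PySem.List.len_eq] at h18
    rw [show Int.toNat 18 = 18 from rfl] at h18
    rw [h18]
  have e1 := congrArg (fun t => (t.map (fun i => PySem.List.pyGetD L i 0)).sum) hsplit1
  simp only [List.map_append, List.sum_append] at e1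
  have e2 := congrArg (fun t => (t.map (fun i => PySem.List.pyGetD L i 0)).sum) hsplit2
  simp only [List.map_append, List.sum_append] at e2
  rw [hsplit1, hsplit2, List.foldl_append, List.foldl_append]
  rw [pvChunk L 0 9 0 0 (by norm_num) (by decide)
        (fun i h1 h2 => by interval_cases i <;> decide)]
  rw [pvChunk L 9 18 _ _ (by norm_num) (by decide)
        (fun i h1 h2 => by interval_cases i <;> decide)]
  rw [pvChunk L 18 (L.length : Int) _ _ (by omega) (by decide)
        (fun i h1 h2 => by
          have h3 : i < 26 := by omega
          interval_cases i <;> decide)]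
  dsimp only
  linarith [e1, e2, hS0, hS9, hS18]

-- the counting fold keeps the list at its initial length
lemma pvCount_length (l : List Char) (cnt : List Int) :
    (l.foldl (fun cnt ch =>
      PySem.List.pySetD cnt ((ch.toNat : Int) - 97)
        (PySem.List.pyGetD cnt ((ch.toNat : Int) - 97) 0 + 1)) cnt).length = cnt.length := by
  induction l generalizing cnt with
  | nil => rfl
  | cons c t ih => simp [List.foldl_cons, ih, PySem.List.length_pySetD]

-- an element of pySetD is an old element or the written value
lemma pvMem_pySetD {x v : Int} {xs : List Int} {i : Int}
    (h : x ∈ PySem.List.pySetD xs i v) : x ∈ xs ∨ x = v := by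
  unfold PySem.List.pySetD PySem.List.pySet? at h
  cases hk : PySem.List.pyIdx? xs.length i with
  | none => rw [hk] at h; simp at h; exact Or.inl h
  | some k => rw [hk] at h; simp at h; exact List.mem_or_eq_of_mem_set h

-- pyGetD with default 0 over a nonnegative list is nonnegative
lemma pvGetD_nonneg (xs : List Int) (i : Int) (h : ∀ x ∈ xs, 0 ≤ x) :
    0 ≤ PySem.List.pyGetD xs i 0 := by
  unfold PySem.List.pyGetD
  cases hk : PySem.List.pyGet? xs i with
  | none => simp
  | some v =>
      have hv : v ∈ xs := by
        unfold PySem.List.pyGet? at hk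
        cases hj : PySem.List.pyIdx? xs.length i with
        | none => rw [hj] at hk; simp at hk
        | some k => rw [hj] at hk; simp at hk; exact List.mem_of_getElem? hk
      simpa using h v hv

-- the counting fold keeps every entry nonnegative
lemma pvCount_nonneg (l : List Char) (cnt : List Int) (h : ∀ x ∈ cnt, 0 ≤ x) :
    ∀ x ∈ l.foldl (fun cnt ch =>
      PySem.List.pySetD cnt ((ch.toNat : Int) - 97)
        (PySem.List.pyGetD cnt ((ch.toNat : Int) - 97) 0 + 1)) cnt, 0 ≤ x := by
  induction l generalizing cnt with
  | nil => exact h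
  | cons c tl ih =>
      rw [List.foldl_cons]
      apply ih
      intro x hx
      rcases pvMem_pySetD hx with h1 | rfl
      · exact h x h1
      · have := pvGetD_nonneg cnt ((c.toNat : Int) - 97) h
        omega

-- the remaining weighted contribution of levels ≥ t to a list L
def pvClamp (L : List Int) (t : Int) : Int := (L.map (fun x => max (x - t + 1) 0)).sum

lemma pvClamp_zero (L : List Int) (t : Int) (h : ∀ x ∈ L, x < t) : pvClamp L t = 0 := by
  unfold pvClamp
  rw [List.sum_eq_zero]
  intro y hy
  simp only [List.mem_map] at hy
  obtain ⟨x, hx, rfl⟩ := hy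
  have := h x hx
  omega

lemma pvClamp_one (L : List Int) (h : ∀ x ∈ L, 0 ≤ x) : pvClamp L 1 = L.sum := by
  induction L with
  | nil => rfl
  | cons x tl ih =>
      have hx := h x (List.mem_cons_self ..)
      simp only [pvClamp, List.map_cons, List.sum_cons] at *
      rw [ih (fun y hy => h y (List.mem_cons_of_mem _ hy))]
      omega

-- advancing the threshold from t past a gap-free block ending at m
lemma pvClamp_step (L : List Int) (t m : Int) (htm : t ≤ m)
    (h : ∀ x ∈ L, x < t ∨ m ≤ x) :
    pvClamp L t = (m - t + 1) * ((L.filter (fun f => decide (t ≤ f))).length : Int)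
      + pvClamp L (m + 1) := by
  induction L with
  | nil => simp [pvClamp]
  | cons x tl ih =>
      have hx := h x (List.mem_cons_self ..)
      have htl := ih (fun y hy => h y (List.mem_cons_of_mem _ hy))
      by_cases hxt : t ≤ x
      · have hmx : m ≤ x := by rcases hx with h1 | h1 <;> omega
        have e1 : max (x - t + 1) 0 = x - t + 1 := by omega
        have e2 : max (x - (m + 1) + 1) 0 = x - m := by omega
        simp only [pvClamp, List.map_cons, List.sum_cons, List.filter_cons, hxt,
          decide_true, if_true, List.length_cons] at *
        rw [e1, e2, htl]
        push_cast
        ring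
      · have e1 : max (x - t + 1) 0 = 0 := by omega
        have e2 : max (x - (m + 1) + 1) 0 = 0 := by omega
        simp only [pvClamp, List.map_cons, List.sum_cons, List.filter_cons, hxt,
          decide_false, if_false, Bool.false_eq_true] at *
        rw [e1, e2, htl]
        ring

-- on a descending-sorted list, the survivors of level t in a drop are a truncated count
lemma pvDropFilter (M : List Int) (hM : M.Pairwise (fun a b => b ≤ a)) (k : Nat) (t : Int) :
    ((M.drop k).filter (fun f => decide (t ≤ f))).length
      = (M.filter (fun f => decide (t ≤ f))).length - k := by
  induction M generalizing k with
  | nil => simp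
  | cons x tl ih =>
      cases k with
      | zero => simp
      | succ k =>
          obtain ⟨hx, htl⟩ := List.pairwise_cons.mp hM
          by_cases hxt : t ≤ x
          · simp only [List.drop_succ_cons, List.filter_cons, hxt, decide_true, if_true,
              List.length_cons]
            rw [ih htl k]
            omega
          · have hnil : tl.filter (fun f => decide (t ≤ f)) = [] := by
              rw [List.filter_eq_nil_iff]
              intro a ha
              have := hx a ha
              simp; omega
            have hnil2 : (tl.drop k).filter (fun f => decide (t ≤ f)) = [] := by
              rw [List.filter_eq_nil_iff]
              intro a ha
              have := hx a (List.mem_of_mem_drop ha)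
              simp; omega
            simp [List.drop_succ_cons, hxt, hnil, hnil2]

-- B's level-set loop computes the three remaining clamp sums of the sorted list
lemma pvLoopB_eq (freq M : List Int) (hperm : M.Perm freq)
    (hM : M.Pairwise (fun a b => (b : Int) ≤ a)) :
    ∀ (fuel : Nat) (t total : Int),
      (freq.filter (fun f => decide (t ≤ f))).length ≤ fuel →
      pvLoopB freq total t fuel
        = total + pvClamp M t + pvClamp (M.drop 9) t + pvClamp (M.drop 18) t := by
  intro fuel
  induction fuel with
  | zero =>
      intro t total hn
      have hnil : freq.filter (fun f => decide (t ≤ f)) = [] :=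
        List.eq_nil_of_length_eq_zero (Nat.le_zero.mp hn)
      have hall : ∀ x ∈ M, x < t := by
        intro x hx
        have hxf : x ∈ freq := (hperm.mem_iff).mp hx
        by_contra hc
        have : x ∈ freq.filter (fun f => decide (t ≤ f)) := by
          rw [List.mem_filter]; exact ⟨hxf, by simp; omega⟩
        rw [hnil] at this; exact absurd this (List.not_mem_nil)
      rw [pvClamp_zero M t hall,
          pvClamp_zero (M.drop 9) t (fun x hx => hall x (List.mem_of_mem_drop hx)),
          pvClamp_zero (M.drop 18) t (fun x hx => hall x (List.mem_of_mem_drop hx))]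
      simp [pvLoopB]
  | succ fuel ih =>
      intro t total hn
      by_cases hg : (freq.filter (fun f => decide (t ≤ f))).length = 0
      · have hnil : freq.filter (fun f => decide (t ≤ f)) = [] :=
          List.eq_nil_of_length_eq_zero hg
        have hall : ∀ x ∈ M, x < t := by
          intro x hx
          have hxf : x ∈ freq := (hperm.mem_iff).mp hx
          by_contra hc
          have : x ∈ freq.filter (fun f => decide (t ≤ f)) := by
            rw [List.mem_filter]; exact ⟨hxf, by simp; omega⟩
          rw [hnil] at this; exact absurd this (List.not_mem_nil)
        rw [pvClamp_zero M t hall,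
            pvClamp_zero (M.drop 9) t (fun x hx => hall x (List.mem_of_mem_drop hx)),
            pvClamp_zero (M.drop 18) t (fun x hx => hall x (List.mem_of_mem_drop hx))]
        simp [pvLoopB, hnil]
      · have hne : freq.filter (fun f => decide (t ≤ f)) ≠ [] := by
          intro h; rw [h] at hg; simp at hg
        obtain ⟨m, hm⟩ : ∃ m, PySem.List.min? (freq.filter (fun f => decide (t ≤ f))) (fun x => x) = some m := by
          cases h : PySem.List.min? (freq.filter (fun f => decide (t ≤ f))) (fun x => x) with
          | none => exact absurd ((PySem.List.min?_eq_none_iff _ _).mp h) hne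
          | some m => exact ⟨m, rfl⟩
        have hmem := PySem.List.min?_mem hm
        have hmin := PySem.List.min?_isMin hm
        have htm : t ≤ m := by
          have := (List.mem_filter.mp hmem).2; simpa using this
        -- every element is either below t or at least m
        have hdisj : ∀ x ∈ M, x < t ∨ m ≤ x := by
          intro x hx
          by_cases hxt : t ≤ x
          · right
            have hxf : x ∈ freq := (hperm.mem_iff).mp hx
            have : x ∈ freq.filter (fun f => decide (t ≤ f)) := by
              rw [List.mem_filter]; exact ⟨hxf, by simp; omega⟩
            simpa using hmin x this
          · left; omega
        -- the filtered counts over freq and over M agree (permutation)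
        have hcnt : (freq.filter (fun f => decide (t ≤ f))).length
            = (M.filter (fun f => decide (t ≤ f))).length := by
          rw [← List.countP_eq_length_filter, ← List.countP_eq_length_filter]
          exact (List.Perm.countP_eq _ hperm).symm
        -- the recursive call's survivor count shrank
        have hlt : (freq.filter (fun f => decide (m + 1 ≤ f))).length
            < (freq.filter (fun f => decide (t ≤ f))).length := by
          have hsub : freq.filter (fun f => decide (m + 1 ≤ f))
              = (freq.filter (fun f => decide (t ≤ f))).filter (fun f => decide (m + 1 ≤ f)) := by
            rw [List.filter_filter]
            apply List.filter_congr
            intro a _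
            by_cases h1 : m + 1 ≤ a
            · simp [h1]; omega
            · simp [h1]
          rw [hsub, List.length_filter_lt_length_iff_exists]
          exact ⟨m, hmem, by simp⟩
        have hgI : ¬ (((freq.filter (fun f => decide (t ≤ f))).length : Int) = 0) := by
          simpa using hg
        show (let g : Int := ((freq.filter (fun f => decide (t ≤ f))).length : Int);
          if g = 0 then total
          else
            let m := (PySem.List.min? (freq.filter (fun f => decide (t ≤ f))) (fun x => x)).getD 0
            pvLoopB freq (total + (m - t + 1) * (g + max (g - 9) 0 + max (g - 18) 0)) (m + 1) fuel) = _
        simp only [hm, Option.getD_some, if_neg hgI]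
        rw [ih (m + 1) _ (by omega)]
        have hd9 : ∀ x ∈ M.drop 9, x < t ∨ m ≤ x :=
          fun x hx => hdisj x (List.mem_of_mem_drop hx)
        have hd18 : ∀ x ∈ M.drop 18, x < t ∨ m ≤ x :=
          fun x hx => hdisj x (List.mem_of_mem_drop hx)
        rw [pvClamp_step M t m htm hdisj,
            pvClamp_step (M.drop 9) t m htm hd9,
            pvClamp_step (M.drop 18) t m htm hd18]
        rw [pvDropFilter M hM 9 t, pvDropFilter M hM 18 t]
        rw [hcnt]
        have c9 : (((M.filter (fun f => decide (t ≤ f))).length - 9 : Nat) : Int)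
            = max (((M.filter (fun f => decide (t ≤ f))).length : Int) - 9) 0 := by omega
        have c18 : (((M.filter (fun f => decide (t ≤ f))).length - 18 : Nat) : Int)
            = max (((M.filter (fun f => decide (t ≤ f))).length : Int) - 18) 0 := by omega
        rw [c9, c18]
        ring

-- ===== VERDICT =====
theorem minimumKeypresses_spec : Claim_equal_minimumKeypresses := by
  intro s _ _
  show minimumKeypresses s = minimumKeypresses_alt s
  unfold minimumKeypresses minimumKeypresses_alt
  set count := s.toList.foldl (fun cnt ch =>
      PySem.List.pySetD cnt ((ch.toNat : Int) - 97)
        (PySem.List.pyGetD cnt ((ch.toNat : Int) - 97) 0 + 1))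
    (List.replicate 26 (0 : Int)) with hcount
  set M := PySem.List.sorted count (fun x => x) true with hMdef
  have hlen : M.length = 26 := by
    rw [hMdef, PySem.List.length_sorted, hcount, pvCount_length]; simp
  have hperm : M.Perm count := PySem.List.sorted_perm count (fun x => x) true
  have hpw : M.Pairwise (fun a b => (b : Int) ≤ a) := PySem.List.sorted_pairwise_rev count (fun x => x)
  have hnonneg : ∀ x ∈ count, 0 ≤ x := by
    rw [hcount]
    exact pvCount_nonneg _ _ (by intro x hx; rw [List.eq_of_mem_replicate hx])
  have hMnonneg : ∀ x ∈ M, 0 ≤ x := fun x hx => hnonneg x (hperm.mem_iff.mp hx)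
  rw [pvLoop26 M hlen]
  have hfle : (count.filter (fun f => decide ((1:Int) ≤ f))).length ≤ 27 := by
    have h1 := List.length_filter_le (fun f => decide ((1:Int) ≤ f)) count
    have h2 : count.length = 26 := by rw [hcount, pvCount_length]; simp
    omega
  rw [pvLoopB_eq count M hperm hpw 27 1 0 hfle]
  rw [pvClamp_one M hMnonneg,
      pvClamp_one (M.drop 9) (fun x hx => hMnonneg x (List.mem_of_mem_drop hx)),
      pvClamp_one (M.drop 18) (fun x hx => hMnonneg x (List.mem_of_mem_drop hx))]
  ring
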